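-- pv_equiv track=rewrite | github.com/novelxv/Pengisian-FRS-Helper | frs_helper.py | graf_lengkap_n
-- ===== SOURCE A (Python) =====
-- from itertools import combinations
--
-- def is_upagraf_lengkap(kombinasi_n_pilihan, matrix):
--     # Mengecek apakah upagraf dengan n simpul merupakan graf lengkap atau bukan
--     lengkap = True
--     for i in range(len(kombinasi_n_pilihan)):
--         for j in range(len(kombinasi_n_pilihan)):
--             if i != j:
--                 if matrix[kombinasi_n_pilihan[i]][kombinasi_n_pilihan[j]] == 0:
--                     lengkap = False
--     return lengkap
--
-- def graf_lengkap_n(banyak_simpul, list_pilihan, matrix):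
--     # Mengembalikan list berisi semua graf lengkap dengan n simpul
--     ada_lengkap = False
--     list_graf_lengkap = []
--     list_index = [i for i in range(len(list_pilihan))]
--     kombinasi = list(combinations(list_index, banyak_simpul))
--     for kombin in kombinasi:
--         if is_upagraf_lengkap(kombin, matrix):
--             ada_lengkap = True
--             list_graf_lengkap.append(kombin)
--     return list_graf_lengkap, ada_lengkap
-- ===== SOURCE B (Python) =====
-- def graf_lengkap_n(banyak_simpul, list_pilihan, matrix):
--     # Recursive backtracking clique enumerator instead of generate-all-combinations-then-filter.
--     def ok(cur, v):
--         # v must be connected to every already-chosen vertex in BOTH directions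
--         return all(matrix[u][v] != 0 and matrix[v][u] != 0 for u in cur)
--
--     def helper(remaining, cur, cands):
--         if remaining == 0:
--             return [tuple(cur)]
--         if remaining > len(cands):
--             return []
--         v, rest = cands[0], cands[1:]
--         found = helper(remaining - 1, cur + [v], rest) if ok(cur, v) else []
--         return found + helper(remaining, cur, rest)
--
--     result = helper(banyak_simpul, [], list(range(len(list_pilihan))))
--     return result, len(result) > 0
-- ===== Notes on version B (the rewrite author's own statement) =====
-- stated objective: alternative
-- what changed: Replaces generate-all-C(m,n)-combinations-then-filter (each filtered by a full O(n^2) double loop over all ordered pairs) with a recursive backtracking enumerator that extends a partial clique only with vertices adjacent (both directions) to all chosen ones and prunes branches with too few remaining candidates.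
import Mathlib
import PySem

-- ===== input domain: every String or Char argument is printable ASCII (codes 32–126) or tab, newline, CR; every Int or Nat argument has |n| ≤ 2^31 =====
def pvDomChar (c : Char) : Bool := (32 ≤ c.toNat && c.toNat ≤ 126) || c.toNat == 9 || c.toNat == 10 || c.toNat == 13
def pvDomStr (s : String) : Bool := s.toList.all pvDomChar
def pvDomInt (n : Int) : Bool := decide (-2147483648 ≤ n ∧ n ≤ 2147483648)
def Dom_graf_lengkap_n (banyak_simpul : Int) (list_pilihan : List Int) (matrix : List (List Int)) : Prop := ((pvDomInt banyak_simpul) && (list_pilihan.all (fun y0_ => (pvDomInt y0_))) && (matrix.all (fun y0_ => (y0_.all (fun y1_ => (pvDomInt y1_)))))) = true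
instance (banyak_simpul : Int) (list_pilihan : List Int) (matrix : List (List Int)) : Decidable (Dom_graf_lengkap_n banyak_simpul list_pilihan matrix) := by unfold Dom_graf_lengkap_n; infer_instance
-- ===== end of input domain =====

-- B replaces A's generate-all-combinations-then-filter with a pruned recursive backtracking
-- clique enumerator (alternative algorithm, same results in the same lexicographic order).

-- ===== PORT A =====
-- Python list indexing is O(1); both ports index through arrays built once from the
-- input lists so the port keeps that cost. matrix[u][v] raises IndexError out of range;
-- Pre_ keeps every access in range and non-negative, so the defaults are never consulted
-- on admitted inputs.
def mEntry (mat : Array (Array Int)) (u v : Int) : Int :=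
  (((mat[u.toNat]?).getD #[])[v.toNat]?).getD 0

-- komb[i] for the in-range non-negative i the loops produce
def aGet (a : Array Int) (i : Int) : Int := (a[i.toNat]?).getD 0

-- literal port of itertools.combinations(xs, k) in its lexicographic emission order
def combosA : Nat → List Int → List (List Int)
  | 0, _ => [[]]
  | _ + 1, [] => []
  | k + 1, x :: xs => ((combosA k xs).map (fun c => x :: c)) ++ combosA (k + 1) xs

def isUpagraf (komb : List Int) (mat : Array (Array Int)) : Bool :=
  let ka := komb.toArray
  (PySem.List.pyRange 0 komb.length 1).foldl (fun acc i =>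
    (PySem.List.pyRange 0 komb.length 1).foldl (fun acc2 j =>
      if i ≠ j then
        if mEntry mat (aGet ka i) (aGet ka j) == 0
        then false else acc2
      else acc2) acc) true

def graf_lengkap_n (banyak_simpul : Int) (list_pilihan : List Int) (matrix : List (List Int)) : List (List Int) × Bool :=
  -- Pre_ gives 0 ≤ banyak_simpul, so .toNat is exact; the accumulating Python
  -- list.append is O(1), ported as Array.push
  let mat := (matrix.map List.toArray).toArray
  let list_index := PySem.List.pyRange 0 list_pilihan.length 1
  let kombinasi := combosA banyak_simpul.toNat list_index
  let res := kombinasi.foldl (fun st kombin =>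
    if isUpagraf kombin mat then (st.1.push kombin, true) else st) (#[], false)
  (res.1.toList, res.2)

-- ===== PORT B =====
def okPair (mat : Array (Array Int)) (u v : Int) : Bool :=
  (mEntry mat u v != 0) && (mEntry mat v u != 0)

def okAll (mat : Array (Array Int)) (cur : List Int) (v : Int) : Bool :=
  cur.all (fun u => okPair mat u v)

def helperB (mat : Array (Array Int)) : Nat → List Int → List Int → List (List Int)
  | 0, cur, _ => [cur]
  | _ + 1, _, [] => []
  | r + 1, cur, v :: rest =>
    if r + 1 > rest.length + 1 then []
    else (if okAll mat cur v then helperB mat r (cur ++ [v]) rest else []) ++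
         helperB mat (r + 1) cur rest

def graf_lengkap_n_alt (banyak_simpul : Int) (list_pilihan : List Int) (matrix : List (List Int)) : List (List Int) × Bool :=
  let mat := (matrix.map List.toArray).toArray
  let result := helperB mat banyak_simpul.toNat [] (PySem.List.pyRange 0 list_pilihan.length 1)
  (result, decide (result.length > 0))

-- ===== PRECONDITION & SPEC =====
-- Pre_ excludes exactly the inputs where Python A raises: negative banyak_simpul
-- (ValueError from combinations) and, when 2 ≤ banyak_simpul ≤ len(list_pilihan),
-- a matrix missing a needed entry (IndexError).
def Pre_graf_lengkap_n (banyak_simpul : Int) (list_pilihan : List Int) (matrix : List (List Int)) : Prop :=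
  0 ≤ banyak_simpul ∧
  (banyak_simpul < 2 ∨ (list_pilihan.length : Int) < banyak_simpul ∨
    ((List.range list_pilihan.length).all (fun a =>
      decide (a < matrix.length) &&
      (List.range list_pilihan.length).all (fun b =>
        b == a || decide (b < (matrix.getD a []).length))) = true))

instance (banyak_simpul : Int) (list_pilihan : List Int) (matrix : List (List Int)) : Decidable (Pre_graf_lengkap_n banyak_simpul list_pilihan matrix) := by
  unfold Pre_graf_lengkap_n; infer_instance

def pvWitness_graf_lengkap_n : Int × List Int × List (List Int) :=
  (2, [7, 9], [[0, 1], [2, 0]])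

def Spec_graf_lengkap_n (banyak_simpul : Int) (list_pilihan : List Int) (matrix : List (List Int)) (out : List (List Int) × Bool) : Prop := out = graf_lengkap_n_alt banyak_simpul list_pilihan matrix
instance (banyak_simpul : Int) (list_pilihan : List Int) (matrix : List (List Int)) (out : List (List Int) × Bool) : Decidable (Spec_graf_lengkap_n banyak_simpul list_pilihan matrix out) := by unfold Spec_graf_lengkap_n; infer_instance

-- ===== CLAIM (what is proved, stated in full; the proofs are below) =====
def Claim_equal_graf_lengkap_n : Prop := ∀ (banyak_simpul : Int) (list_pilihan : List Int) (matrix : List (List Int)), Dom_graf_lengkap_n banyak_simpul list_pilihan matrix → Pre_graf_lengkap_n banyak_simpul list_pilihan matrix → Spec_graf_lengkap_n banyak_simpul list_pilihan matrix (graf_lengkap_n banyak_simpul list_pilihan matrix)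

-- ===== LEMMAS AND PROOFS =====

-- the pair relation a clique has to satisfy (both directed entries non-zero)
def OkP (mat : Array (Array Int)) (u v : Int) : Prop :=
  mEntry mat u v ≠ 0 ∧ mEntry mat v u ≠ 0

-- incremental clique check: every element fits all earlier ones
def pwAux (mat : Array (Array Int)) (cur : List Int) : List Int → Bool
  | [] => true
  | v :: vs => okAll mat cur v && pwAux mat (cur ++ [v]) vs

theorem aGet_toArray (l : List Int) (i : Nat) : aGet l.toArray (i : Int) = l.getD i 0 := by
  simp [aGet, List.getD_eq_getElem?_getD]

theorem foldl_band {α : Type} (l : List α) (g : α → Bool) (b : Bool) :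
    l.foldl (fun acc x => acc && g x) b = (b && l.all g) := by
  induction l generalizing b with
  | nil => simp
  | cons x xs ih => simp [List.foldl_cons, ih, Bool.and_assoc]

theorem bool_eq_of_iff {a b : Bool} (h : a = true ↔ b = true) : a = b := by
  cases a <;> cases b <;> simp_all

theorem isUpagraf_iff (komb : List Int) (mat : Array (Array Int)) :
    isUpagraf komb mat = true ↔
      ∀ i j : Nat, i < komb.length → j < komb.length → i ≠ j →
        mEntry mat (komb.getD i 0) (komb.getD j 0) ≠ 0 := by
  have hb : ∀ i : Int,
      (fun (acc2 : Bool) (j : Int) =>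
        if i ≠ j then
          (if mEntry mat (aGet komb.toArray i) (aGet komb.toArray j) == 0
           then false else acc2)
        else acc2)
      = (fun (acc2 : Bool) (j : Int) =>
          acc2 && ((!decide (i ≠ j)) ||
            (mEntry mat (aGet komb.toArray i) (aGet komb.toArray j) != 0))) := by
    intro i; funext acc2 j
    by_cases h : i = j
    · simp [h]
    · cases hz : (mEntry mat (aGet komb.toArray i) (aGet komb.toArray j) == 0) <;>
        simp [h, hz, bne]
  unfold isUpagraf
  simp only [hb, foldl_band, Bool.true_and]
  rw [PySem.List.pyRange_zero_natCast]
  simp only [List.all_eq_true, List.forall_mem_map, List.mem_range, Bool.or_eq_true,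
    Bool.not_eq_true', decide_eq_false_iff_not, not_not, bne_iff_ne,
    aGet_toArray, ne_eq]
  constructor
  · intro h i j hi hj hij
    rcases h i hi j hj with heq | hne
    · exact absurd (by exact_mod_cast heq) hij
    · exact hne
  · intro h i hi j hj
    by_cases heq : i = j
    · exact Or.inl (by exact_mod_cast heq)
    · exact Or.inr (h i j hi hj heq)

theorem pwAux_iff (mat : Array (Array Int)) (l : List Int) : ∀ cur : List Int,
    pwAux mat cur l = true ↔
      ((∀ u ∈ cur, ∀ v ∈ l, OkP mat u v) ∧ l.Pairwise (OkP mat)) := by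
  induction l with
  | nil => intro cur; simp [pwAux]
  | cons v vs ih =>
    intro cur
    have hok : okAll mat cur v = true ↔ ∀ u ∈ cur, OkP mat u v := by
      simp [okAll, okPair, OkP, List.all_eq_true, bne_iff_ne]
    simp only [pwAux, Bool.and_eq_true, hok, ih (cur ++ [v])]
    constructor
    · rintro ⟨h1, h2, h3⟩
      refine ⟨?_, ?_⟩
      · intro u hu w hw
        rcases List.mem_cons.mp hw with rfl | hw
        · exact h1 u hu
        · exact h2 u (List.mem_append.mpr (Or.inl hu)) w hw
      · exact List.Pairwise.cons (fun w hw => h2 v (by simp) w hw) h3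
    · rintro ⟨h1, h2⟩
      rcases List.pairwise_cons.mp h2 with ⟨hv, hvs⟩
      refine ⟨fun u hu => h1 u hu v (by simp), ?_, hvs⟩
      intro u hu w hw
      rcases List.mem_append.mp hu with hu | hu
      · exact h1 u hu w (by simp [hw])
      · have : u = v := by simpa using hu
        subst this
        exact hv w hw

theorem isUpagraf_eq_pwAux (mat : Array (Array Int)) (c : List Int) :
    isUpagraf c mat = pwAux mat [] c := by
  apply bool_eq_of_iff
  rw [isUpagraf_iff, pwAux_iff]
  constructor
  · intro h
    refine ⟨by simp, ?_⟩
    rw [List.pairwise_iff_getElem]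
    intro i j hi hj hij
    refine ⟨?_, ?_⟩
    · have h1 := h i j hi hj (by omega)
      rwa [List.getD_eq_getElem c 0 hi, List.getD_eq_getElem c 0 hj] at h1
    · have h1 := h j i hj hi (by omega)
      rwa [List.getD_eq_getElem c 0 hj, List.getD_eq_getElem c 0 hi] at h1
  · rintro ⟨-, h⟩
    rw [List.pairwise_iff_getElem] at h
    intro i j hi hj hij
    rw [List.getD_eq_getElem c 0 hi, List.getD_eq_getElem c 0 hj]
    rcases Nat.lt_or_ge i j with hlt | hge
    · exact (h i j hi hj hlt).1
    · exact (h j i hj hi (by omega)).2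

theorem combosA_eq_nil {r : Nat} {cands : List Int} (h : cands.length < r) :
    combosA r cands = [] := by
  induction cands generalizing r with
  | nil =>
    cases r with
    | zero => omega
    | succ k => rfl
  | cons x xs ih =>
    cases r with
    | zero => omega
    | succ k =>
      have hx : xs.length < k := by simpa using h
      simp [combosA, ih hx, ih (show xs.length < k + 1 by omega)]

theorem helperB_eq (mat : Array (Array Int)) (cands : List Int) : ∀ (r : Nat) (cur : List Int),
    helperB mat r cur cands =
      ((combosA r cands).filter (fun c => pwAux mat cur c)).map (fun c => cur ++ c) := by
  induction cands with
  | nil =>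
    intro r cur
    cases r with
    | zero => simp [helperB, combosA, pwAux]
    | succ k => simp [helperB, combosA]
  | cons v rest ih =>
    intro r cur
    cases r with
    | zero => simp [helperB, combosA, pwAux]
    | succ k =>
      simp only [helperB]
      by_cases hlen : k + 1 > rest.length + 1
      · rw [if_pos hlen, combosA_eq_nil (show (v :: rest).length < k + 1 by simp; omega)]
        simp
      · rw [if_neg hlen]
        have hsplit : combosA (k + 1) (v :: rest)
            = ((combosA k rest).map (fun c => v :: c)) ++ combosA (k + 1) rest := rfl
        rw [hsplit, List.filter_append, List.map_append, ih (k + 1) cur]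
        congr 1
        rw [List.filter_map]
        by_cases hok : okAll mat cur v = true
        · rw [if_pos hok, ih k (cur ++ [v])]
          have hpred : ((fun c => pwAux mat cur c) ∘ (fun c => v :: c))
              = fun c => pwAux mat (cur ++ [v]) c := by
            funext c; simp [Function.comp, pwAux, hok]
          rw [hpred, List.map_map]
          have hmap : ((fun c => cur ++ c) ∘ (fun c => v :: c))
              = fun c => (cur ++ [v]) ++ c := by
            funext c; simp
          rw [hmap]
        · rw [if_neg hok]
          have hf : okAll mat cur v = false := by simpa using hok
          have hpred : ((fun c => pwAux mat cur c) ∘ (fun c => v :: c))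
              = fun _ => false := by
            funext c; simp [Function.comp, pwAux, hf]
          rw [hpred]
          simp

theorem foldl_collect (l : List (List Int)) (p : List Int → Bool) (acc : Array (List Int)) (b : Bool) :
    (l.foldl (fun st k => if p k then (st.1.push k, true) else st) (acc, b)).1.toList
        = acc.toList ++ l.filter p ∧
      (l.foldl (fun st k => if p k then (st.1.push k, true) else st) (acc, b)).2
        = (b || l.any p) := by
  induction l generalizing acc b with
  | nil => simp
  | cons x xs ih =>
    by_cases h : p x = true <;>
      simp [List.foldl_cons, h, ih, Array.toList_push]

theorem any_eq_filter_pos (l : List (List Int)) (p : List Int → Bool) :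
    l.any p = decide (0 < (l.filter p).length) := by
  cases h : l.any p with
  | false =>
    have hnil : l.filter p = [] := List.filter_eq_nil_iff.mpr (by
      intro a ha hpa
      have := List.any_eq_true.mpr (Exists.intro a (And.intro ha hpa))
      simp [h] at this)
    simp [hnil]
  | true =>
    obtain ⟨x, hx, hpx⟩ := List.any_eq_true.mp h
    have hm : x ∈ l.filter p := List.mem_filter.mpr ⟨hx, hpx⟩
    have hlen := List.length_pos_of_mem hm
    simp [hlen]

-- ===== VERDICT (by name: the statement is the Claim_ definition above) =====
theorem graf_lengkap_n_spec : Claim_equal_graf_lengkap_n := by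
  intro n lp matrix _dom _pre
  unfold Spec_graf_lengkap_n graf_lengkap_n graf_lengkap_n_alt
  dsimp only
  obtain ⟨h1, h2⟩ := foldl_collect
    (combosA n.toNat (PySem.List.pyRange 0 lp.length 1))
    (fun c => isUpagraf c ((matrix.map List.toArray).toArray)) #[] false
  refine Prod.ext_iff.mpr ⟨?_, ?_⟩
  · rw [h1, helperB_eq]
    rw [List.filter_congr
      (fun c _ => isUpagraf_eq_pwAux ((matrix.map List.toArray).toArray) c)]
    simp
  · rw [h2, helperB_eq]
    simp only [any_eq_filter_pos]
    rw [List.filter_congr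
      (fun c _ => isUpagraf_eq_pwAux ((matrix.map List.toArray).toArray) c)]
    simp
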